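-- pv_equiv track=rewrite | github.com/xyzw12345/2024Spring---Data-Structure-and-Algorithm-B | code/20240309 openjudge24591 中序表达式转后序表达式.py | SplitIntoNum
-- ===== SOURCE A (Python) =====
-- def isSign(c) :
--     if c == "+" or c == "-" or c == "*" or c == "/" :
--         return True
--     else :
--         return False
--
-- def isSignOrBracket(c) :
--     if isSign(c) or c == "(" or c == ")" :
--         return True
--     else :
--         return False
--
-- def SplitIntoNum(s) :
--     res = []
--     tmp = []
--     flag = True
--     for c in s :
--         if c == " " :
--             if not flag :
--                 res.append("".join(str(i) for i in tmp))
--                 tmp = []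
--                 flag = True
--         elif isSignOrBracket(c) :
--             if not flag :
--                 res.append("".join(str(i) for i in tmp))
--                 tmp = []
--                 flag = True
--             res.append(c)
--         else :
--             tmp.append(c)
--             flag = False
--     if not flag :
--         res.append("".join(str(i) for i in tmp))
--     return res
-- ===== SOURCE B (Python) =====
-- def SplitIntoNum(s):
--     # Pad every operator/bracket with spaces, then split on the literal space
--     # and drop empty pieces; tabs/newlines are ordinary token characters, as in A.
--     for op in "+-*/()":
--         s = s.replace(op, " " + op + " ")
--     return [t for t in s.split(" ") if t]
-- ===== Notes on version B (the rewrite author's own statement) =====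
-- stated objective: idiomatic
-- what changed: B replaces the flag/accumulator character loop by padding every operator/bracket with spaces via str.replace and then splitting on the literal space, dropping empty pieces.
import Mathlib
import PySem

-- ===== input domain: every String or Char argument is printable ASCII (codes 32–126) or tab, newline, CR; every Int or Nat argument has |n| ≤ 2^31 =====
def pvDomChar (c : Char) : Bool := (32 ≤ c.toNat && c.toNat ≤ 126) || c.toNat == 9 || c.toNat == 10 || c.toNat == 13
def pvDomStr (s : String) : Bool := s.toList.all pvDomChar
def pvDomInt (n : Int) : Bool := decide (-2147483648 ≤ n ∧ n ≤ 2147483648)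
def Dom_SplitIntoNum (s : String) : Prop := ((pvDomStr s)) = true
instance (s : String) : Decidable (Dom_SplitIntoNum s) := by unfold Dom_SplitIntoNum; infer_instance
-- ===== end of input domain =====

-- B replaces A's flag/accumulator character loop by padding each operator/bracket with
-- spaces (str.replace) and splitting on the literal space, dropping empty pieces (idiomatic).

-- ===== PORT A =====
def isSign (c : Char) : Bool :=
  if c = '+' || c = '-' || c = '*' || c = '/' then true else false

def isSignOrBracket (c : Char) : Bool :=
  if isSign c || c = '(' || c = ')' then true else false

-- "".join(str(i) for i in tmp)  (str of a 1-char string is itself)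
def pvJoinTmp (tmp : List Char) : String :=
  String.ofList (PySem.Chars.join [] (tmp.map (fun c => [c])))

-- the body of A's `for c in s` loop, on state (res, tmp, flag)
def pvStepA (st : List String × List Char × Bool) (c : Char) : List String × List Char × Bool :=
  let res := st.1; let tmp := st.2.1; let flag := st.2.2
  if c = ' ' then
    if !flag then (res ++ [pvJoinTmp tmp], [], true) else (res, tmp, flag)
  else if isSignOrBracket c then
    let st2 := if !flag then (res ++ [pvJoinTmp tmp], ([] : List Char), true) else (res, tmp, flag)
    (st2.1 ++ [String.ofList [c]], st2.2.1, st2.2.2)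
  else (res, tmp ++ [c], false)

-- A's trailing `if not flag: res.append(...)` and `return res`
def pvFinish (st : List String × List Char × Bool) : List String :=
  if !st.2.2 then st.1 ++ [pvJoinTmp st.2.1] else st.1

def SplitIntoNum (s : String) : List String :=
  pvFinish (s.toList.foldl pvStepA ([], [], true))

-- ===== PORT B =====
def SplitIntoNum_alt (s : String) : List String :=
  let padded := "+-*/()".toList.foldl
    (fun t c => PySem.Chars.replace t [c] [' ', c, ' ']) s.toList
  ((PySem.Chars.splitOn padded [' ']).filter (fun t => !t.isEmpty)).map String.ofList

-- ===== PRECONDITION & SPEC =====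
def Spec_SplitIntoNum (s : String) (out : List String) : Prop := out = SplitIntoNum_alt s
instance (s : String) (out : List String) : Decidable (Spec_SplitIntoNum s out) := by unfold Spec_SplitIntoNum; infer_instance

-- ===== CLAIM (what is proved, stated in full; the proofs are below) =====
def Claim_equal_SplitIntoNum : Prop := ∀ (s : String), Dom_SplitIntoNum s → Spec_SplitIntoNum s (SplitIntoNum s)

-- ===== LEMMAS AND PROOFS =====

-- what one character contributes after all the padding passes
def pvPad (c : Char) : List Char := if isSignOrBracket c then [' ', c, ' '] else [c]

def pvEmit (tmp : List Char) : List (List Char) := if tmp = [] then [] else [tmp]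

-- the common specification of both tokenizers, with pending run `tmp`
def pvPend : List Char → List Char → List (List Char)
  | tmp, [] => pvEmit tmp
  | tmp, c :: r =>
    if c = ' ' then pvEmit tmp ++ pvPend [] r
    else if isSignOrBracket c then pvEmit tmp ++ [c] :: pvPend [] r
    else pvPend (tmp ++ [c]) r

-- split on the single space character, keeping empty pieces, with pending piece `tmp`
def pvSplit : List Char → List Char → List (List Char)
  | tmp, [] => [tmp]
  | tmp, c :: r => if c = ' ' then tmp :: pvSplit [] r else pvSplit (tmp ++ [c]) r

lemma pvJoinTmp_eq (tmp : List Char) : pvJoinTmp tmp = String.ofList tmp := by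
  simp [pvJoinTmp, PySem.Chars.join_nil_singletons]

lemma opc_iff (x : Char) :
    isSignOrBracket x = true ↔ x = '+' ∨ x = '-' ∨ x = '*' ∨ x = '/' ∨ x = '(' ∨ x = ')' := by
  simp [isSignOrBracket, isSign]; tauto

lemma replace_go_single (c : Char) (new : List Char) :
    ∀ (fuel : Nat) (l acc : List Char), l.length ≤ fuel →
      PySem.Chars.replace.go [c] new fuel l acc
        = acc.reverse ++ l.flatMap (fun x => if x = c then new else [x]) := by
  intro fuel
  induction fuel with
  | zero =>
    intro l acc h
    have : l = [] := List.eq_nil_of_length_eq_zero (Nat.le_zero.mp h)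
    subst this; simp [PySem.Chars.replace.go]
  | succ n ih =>
    intro l acc h
    cases l with
    | nil => simp [PySem.Chars.replace.go]
    | cons x t =>
      have ht : t.length ≤ n := by simp at h; omega
      by_cases hx : x = c
      · subst hx
        have hpre : List.isPrefixOf [x] (x :: t) = true := by simp [List.isPrefixOf]
        rw [PySem.Chars.replace.go, if_pos hpre]
        have hd : List.drop (List.length [x]) (x :: t) = t := rfl
        rw [hd, ih t _ ht]
        simp
      · have hpre : List.isPrefixOf [c] (x :: t) = false := by
          simp [List.isPrefixOf]; exact fun hh => (hx hh.symm).elim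
        rw [PySem.Chars.replace.go, if_neg (by simp [hpre])]
        rw [ih t (x :: acc) ht]
        simp [hx]

lemma replace_single (t : List Char) (c : Char) (new : List Char) :
    PySem.Chars.replace t [c] new = t.flatMap (fun x => if x = c then new else [x]) := by
  rw [PySem.Chars.replace, if_neg (by simp)]
  exact (replace_go_single c new t.length t [] le_rfl).trans (by simp)

lemma splitOn_go_space :
    ∀ (fuel : Nat) (l cur : List Char) (acc : List (List Char)), l.length < fuel →
      PySem.Chars.splitOn.go [' '] fuel l cur acc
        = acc.reverse ++ pvSplit cur.reverse l := by
  intro fuel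
  induction fuel with
  | zero => intro l cur acc h; omega
  | succ n ih =>
    intro l cur acc h
    cases l with
    | nil => simp [PySem.Chars.splitOn.go, pvSplit]
    | cons x t =>
      have ht : t.length < n := by simp at h; omega
      by_cases hx : x = ' '
      · subst hx
        have hpre : List.isPrefixOf [' '] (' ' :: t) = true := by simp [List.isPrefixOf]
        rw [PySem.Chars.splitOn.go, if_pos hpre]
        have hd : List.drop (List.length [' ']) (' ' :: t) = t := rfl
        rw [hd, ih t [] (cur.reverse :: acc) ht]
        simp [pvSplit]
      · have hpre : List.isPrefixOf [' '] (x :: t) = false := by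
          simp [List.isPrefixOf]; exact fun hh => (hx hh.symm).elim
        rw [PySem.Chars.splitOn.go, if_neg (by simp [hpre])]
        rw [ih t (x :: cur) acc ht]
        simp [pvSplit, hx]

lemma splitOn_space (l : List Char) :
    PySem.Chars.splitOn l [' '] = pvSplit [] l := by
  rw [PySem.Chars.splitOn, splitOn_go_space (l.length + 1) l [] [] (Nat.lt_succ_self _)]
  simp

-- the sequence of str.replace passes acts like one simultaneous substitution
lemma fold_repl :
    ∀ (rest : List Char), rest.Nodup → ' ' ∉ rest → ∀ (t : List Char),
      rest.foldl (fun t c => PySem.Chars.replace t [c] [' ', c, ' ']) t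
        = t.flatMap (fun x => if x ∈ rest then [' ', x, ' '] else [x]) := by
  intro rest
  induction rest with
  | nil => intro _ _ t; simp
  | cons c r ih =>
    intro hnd hsp t
    have hcr : c ∉ r := (List.nodup_cons.mp hnd).1
    have hspr : ' ' ∉ r := fun h => hsp (List.mem_cons_of_mem _ h)
    simp only [List.foldl_cons]
    rw [ih (List.nodup_cons.mp hnd).2 hspr, replace_single, List.flatMap_assoc]
    congr 1
    funext x
    by_cases hx : x = c
    · subst hx
      simp [hcr, hspr]
    · by_cases hxr : x ∈ r <;> simp [hx, hxr]

lemma pad_eq :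
    (fun x => if x ∈ ['+', '-', '*', '/', '(', ')'] then [' ', x, ' '] else [x]) = pvPad := by
  funext x
  by_cases h : isSignOrBracket x = true
  · rw [pvPad, if_pos h, if_pos (by simpa [opc_iff] using h)]
  · rw [pvPad, if_neg h, if_neg (by simpa [opc_iff] using h)]

lemma split_pend : ∀ (cs tmp : List Char),
    (pvSplit tmp (cs.flatMap pvPad)).filter (fun t => !t.isEmpty) = pvPend tmp cs := by
  intro cs
  induction cs with
  | nil => intro tmp; by_cases h : tmp = [] <;> simp [pvSplit, pvPend, pvEmit, h]
  | cons c r ih =>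
    intro tmp
    by_cases hcs : c = ' '
    · subst hcs
      have hop : isSignOrBracket ' ' = false := by decide
      by_cases h : tmp = [] <;>
        simp [pvPad, hop, pvSplit, pvPend, pvEmit, h, ih]
    · by_cases hop : isSignOrBracket c = true
      · by_cases h : tmp = [] <;>
          simp [pvPad, hop, hcs, pvSplit, pvPend, pvEmit, h, ih]
      · simp only [List.flatMap_cons, pvPad, if_neg hop, List.singleton_append]
        rw [pvSplit, if_neg (by simpa using hcs), pvPend, if_neg (by simpa using hcs), if_neg hop]
        exact ih (tmp ++ [c])

lemma loopA : ∀ (cs : List Char) (res : List String) (tmp : List Char),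
    pvFinish (cs.foldl pvStepA (res, tmp, tmp.isEmpty))
      = res ++ (pvPend tmp cs).map String.ofList := by
  intro cs
  induction cs with
  | nil =>
    intro res tmp
    by_cases h : tmp = [] <;> simp [pvFinish, pvPend, pvEmit, h, pvJoinTmp_eq]
  | cons c r ih =>
    intro res tmp
    rw [List.foldl_cons]
    by_cases hcs : c = ' '
    · subst hcs
      by_cases h : tmp = []
      · subst h
        have hstep : pvStepA (res, [], List.isEmpty ([] : List Char)) ' ' = (res, [], true) := by
          simp [pvStepA]
        rw [hstep]
        have h2 := ih res []
        simp only [List.isEmpty_nil] at h2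
        rw [h2]
        simp [pvPend, pvEmit]
      · have hf : tmp.isEmpty = false := by simp [h]
        have hstep : pvStepA (res, tmp, tmp.isEmpty) ' '
            = (res ++ [pvJoinTmp tmp], [], true) := by
          simp [pvStepA, hf]
        rw [hstep]
        have h2 := ih (res ++ [pvJoinTmp tmp]) []
        simp only [List.isEmpty_nil] at h2
        rw [h2, pvJoinTmp_eq]
        simp [pvPend, pvEmit, h]
    · by_cases hop : isSignOrBracket c = true
      · by_cases h : tmp = []
        · subst h
          have hstep : pvStepA (res, [], List.isEmpty ([] : List Char)) c
              = (res ++ [String.ofList [c]], [], true) := by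
            simp [pvStepA, hcs, hop]
          rw [hstep]
          have h2 := ih (res ++ [String.ofList [c]]) []
          simp only [List.isEmpty_nil] at h2
          rw [h2]
          simp [pvPend, pvEmit, hcs, hop]
        · have hf : tmp.isEmpty = false := by simp [h]
          have hstep : pvStepA (res, tmp, tmp.isEmpty) c
              = (res ++ [pvJoinTmp tmp] ++ [String.ofList [c]], [], true) := by
            simp [pvStepA, hcs, hop, hf]
          rw [hstep]
          have h2 := ih (res ++ [pvJoinTmp tmp] ++ [String.ofList [c]]) []
          simp only [List.isEmpty_nil] at h2
          rw [h2, pvJoinTmp_eq]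
          simp [pvPend, pvEmit, hcs, hop, h]
      · have hstep : pvStepA (res, tmp, tmp.isEmpty) c = (res, tmp ++ [c], false) := by
          simp [pvStepA, hcs, hop]
        have hf : (tmp ++ [c]).isEmpty = false := by simp
        rw [hstep]
        have h2 := ih res (tmp ++ [c])
        rw [hf] at h2
        rw [h2, pvPend, if_neg (by simpa using hcs), if_neg hop]

-- ===== VERDICT (by name: the statement is the Claim_ definition above) =====
theorem SplitIntoNum_spec : Claim_equal_SplitIntoNum := by
  intro s _
  show SplitIntoNum s = SplitIntoNum_alt s
  have hB : SplitIntoNum_alt s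
      = ((PySem.Chars.splitOn (s.toList.flatMap pvPad) [' ']).filter
          (fun t => !t.isEmpty)).map String.ofList := by
    show ((PySem.Chars.splitOn ("+-*/()".toList.foldl
        (fun t c => PySem.Chars.replace t [c] [' ', c, ' ']) s.toList) [' ']).filter
          (fun t => !t.isEmpty)).map String.ofList = _
    rw [show "+-*/()".toList = ['+', '-', '*', '/', '(', ')'] from rfl,
      fold_repl ['+', '-', '*', '/', '(', ')'] (by decide) (by decide) s.toList, pad_eq]
  have hA : SplitIntoNum s = [] ++ (pvPend [] s.toList).map String.ofList := by
    have h2 := loopA s.toList [] []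
    simpa only [List.isEmpty_nil] using h2
  rw [hA, hB, splitOn_space, split_pend]
  simp
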